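-- pv_equiv track=rewrite | github.com/Biksbois/BiksStonks | Forcasting_Models/utils/DatasetAccess.py | FormatDataForLSTM
-- ===== SOURCE A (Python) =====
-- from itertools import islice
--
-- def window1(seq, n=2):
--     it = iter(seq)
--     result = tuple(islice(it, n))
--     if len(result) == n:
--         yield result
--     for elem in it:
--         result = result[1:] + (elem,)
--         yield result
--
-- def FormatDataForLSTM(stocks, window_size):
--     WindowedStocks = []
--     for stock in stocks:
--         WindowedStocks.append(window1(stock, window_size))
--     result = []
--     for window in WindowedStocks:
--         for i in window:
--             result.append(i)
--     return result
-- ===== SOURCE B (Python) =====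
-- def FormatDataForLSTM(stocks, window_size):
--     result = []
--     for stock in stocks:
--         for i in range(len(stock) - window_size + 1):
--             result.append(tuple(stock[i:i+window_size]))
--     return result
-- ===== Notes on version B (the rewrite author's own statement) =====
-- stated objective: simpler
-- what changed: Replaces the stateful rolling-tuple generator plus the list-of-generators-then-flatten pass with one flat index-based slicing loop per stock.
-- outside the precondition, e.g. on FormatDataForLSTM([[1, 2]], 0): A returns [(), (1,), (2,)], B returns [(), (), ()]; on FormatDataForLSTM([[1, 2]], -1): A raises ValueError, B returns [(1,), (), (), ()]
import Mathlib
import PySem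

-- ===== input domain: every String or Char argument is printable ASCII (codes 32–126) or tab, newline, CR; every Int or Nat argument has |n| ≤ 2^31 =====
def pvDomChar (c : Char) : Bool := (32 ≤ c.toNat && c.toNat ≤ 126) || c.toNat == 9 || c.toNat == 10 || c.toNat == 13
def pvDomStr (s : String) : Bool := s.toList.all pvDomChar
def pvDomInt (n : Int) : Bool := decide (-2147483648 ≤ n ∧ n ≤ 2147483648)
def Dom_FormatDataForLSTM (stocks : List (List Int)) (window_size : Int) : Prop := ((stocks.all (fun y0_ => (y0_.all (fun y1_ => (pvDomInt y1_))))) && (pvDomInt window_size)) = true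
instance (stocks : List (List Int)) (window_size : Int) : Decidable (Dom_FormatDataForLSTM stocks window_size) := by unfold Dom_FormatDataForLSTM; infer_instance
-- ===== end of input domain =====

-- B replaces the rolling-tuple generator and the two-stage build-then-flatten pass
-- with one flat index-based slicing loop per stock (objective: simpler).

-- ===== PORT A =====
-- window1: the generator's yields collected in order; the rolling tuple is the fold state.
def window1 (seq : List Int) (n : Int) : List (List Int) :=
  let result := seq.take n.toNat          -- tuple(islice(it, n))
  let rest := seq.drop n.toNat            -- what remains of the iterator
  let init := if (result.length : Int) = n then [result] else []
  (rest.foldl (fun (st : List (List Int) × List Int) elem =>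
      (st.1 ++ [st.2.drop 1 ++ [elem]], st.2.drop 1 ++ [elem])) (init, result)).1

def FormatDataForLSTM (stocks : List (List Int)) (window_size : Int) : List (List Int) :=
  let WindowedStocks := stocks.foldl (fun acc stock => acc ++ [window1 stock window_size]) []
  WindowedStocks.foldl (fun res w => res ++ w) []

-- ===== PORT B =====
def FormatDataForLSTM_alt (stocks : List (List Int)) (window_size : Int) : List (List Int) :=
  stocks.foldl (fun res stock =>
    (PySem.List.pyRange 0 ((stock.length : Int) - window_size + 1) 1).foldl
      (fun res i => res ++ [PySem.List.slice stock (some i) (some (i + window_size))]) res) []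

-- ===== PRECONDITION & SPEC =====
-- Pre_ excludes window_size < 0, where A raises ValueError, and window_size = 0, where
-- A's '()' followed by singleton tuples is an accidental artefact of the rolling-tuple
-- iterator and no behaviour is specified; on all positive window sizes A returns normally.
def Pre_FormatDataForLSTM (stocks : List (List Int)) (window_size : Int) : Prop := 1 ≤ window_size
instance (stocks : List (List Int)) (window_size : Int) : Decidable (Pre_FormatDataForLSTM stocks window_size) := by unfold Pre_FormatDataForLSTM; infer_instance
def pvWitness_FormatDataForLSTM : List (List Int) × Int := ([[1, 2, 3], [4]], 2)

def Spec_FormatDataForLSTM (stocks : List (List Int)) (window_size : Int) (out : List (List Int)) : Prop := out = FormatDataForLSTM_alt stocks window_size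
instance (stocks : List (List Int)) (window_size : Int) (out : List (List Int)) : Decidable (Spec_FormatDataForLSTM stocks window_size out) := by unfold Spec_FormatDataForLSTM; infer_instance

-- ===== CLAIM (what is proved, stated in full; the proofs are below) =====
def Claim_equal_FormatDataForLSTM : Prop := ∀ (stocks : List (List Int)) (window_size : Int), Dom_FormatDataForLSTM stocks window_size → Pre_FormatDataForLSTM stocks window_size → Spec_FormatDataForLSTM stocks window_size (FormatDataForLSTM stocks window_size)

-- ===== LEMMAS AND PROOFS =====

-- Invariant of window1's rolling fold: with |r| = k ≥ 1, each step yields the next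
-- k-window of r ++ t.
lemma windowFold (k : Nat) (hk : 1 ≤ k) :
    ∀ (t r : List Int) (acc : List (List Int)), r.length = k →
    (t.foldl (fun (st : List (List Int) × List Int) elem =>
        (st.1 ++ [st.2.drop 1 ++ [elem]], st.2.drop 1 ++ [elem])) (acc, r)).1
    = acc ++ (List.range t.length).map (fun j => ((r ++ t).drop (j + 1)).take k) := by
  intro t
  induction t with
  | nil => intro r acc _; simp
  | cons e t' ih =>
    intro r acc hr
    obtain ⟨h, rt, rfl⟩ : ∃ h rt, r = h :: rt := by
      cases r with
      | nil => simp at hr; omega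
      | cons h rt => exact ⟨h, rt, rfl⟩
    simp only [List.foldl_cons]
    rw [ih ((h :: rt).drop 1 ++ [e]) _ (by simp at hr ⊢; omega)]
    simp only [List.drop_one, List.tail_cons, List.length_cons]
    rw [List.range_succ_eq_map, List.map_cons, List.map_map]
    have h0 : ((h :: rt ++ e :: t').drop (0 + 1)).take k = rt ++ [e] := by
      have h1 : (rt ++ e :: t') = (rt ++ [e]) ++ t' := by simp
      simp only [List.cons_append, zero_add, List.drop_one, List.tail_cons, h1]
      rw [List.take_append_of_le_length (by simp at hr ⊢; omega)]
      have : (rt ++ [e]).length = k := by simp at hr ⊢; omega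
      rw [← this, List.take_length]
    rw [h0]
    have hrest : (List.range t'.length).map
          ((fun j => ((h :: rt ++ e :: t').drop (j + 1)).take k) ∘ fun i => i + 1)
        = (List.range t'.length).map (fun j => (((rt ++ [e]) ++ t').drop (j + 1)).take k) := by
      apply List.map_congr_left
      intro j _
      have h2 : (h :: rt ++ e :: t') = h :: ((rt ++ [e]) ++ t') := by simp
      simp only [Function.comp, h2]
      rfl
    rw [hrest]
    simp

lemma window1_eq (s : List Int) (n : Int) (hn : 1 ≤ n) :
    window1 s n = (PySem.List.pyRange 0 ((s.length : Int) - n + 1) 1).map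
      (fun i => PySem.List.slice s (some i) (some (i + n))) := by
  obtain ⟨k, rfl⟩ : ∃ k : Nat, n = (k : Int) := ⟨n.toNat, by omega⟩
  have hk : 1 ≤ k := by exact_mod_cast hn
  unfold window1
  simp only [Int.toNat_natCast]
  by_cases hlen : k ≤ s.length
  · -- long enough: the init yield fires, rest = s.drop k
    have hres : (s.take k).length = k := by simp; omega
    have hif : ((s.take k).length : Int) = (k : Int) := by exact_mod_cast hres
    rw [if_pos hif, windowFold k hk _ _ _ hres]
    rw [List.take_append_drop]
    have hm : (s.length : Int) - (k : Int) + 1 = ((s.length - k + 1 : Nat) : Int) := by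
      push_cast [Nat.cast_sub hlen]; ring
    rw [hm, PySem.List.pyRange_one, List.map_map]
    have hlen2 : (s.drop k).length = s.length - k := by simp
    rw [hlen2]
    have : (((s.length - k + 1 : Nat) : Int) - 0).toNat = s.length - k + 1 := by omega
    rw [this]
    have hR : ∀ j ∈ List.range (s.length - k + 1),
        (fun i => PySem.List.slice s (some i) (some (i + (k : Int)))) ((fun m : Nat => (0 : Int) + (m : Int)) j)
        = (s.drop j).take k := by
      intro j _
      simp only [zero_add]
      exact PySem.List.slice_natCast_add s j k
    simp only [Function.comp_def]
    rw [List.map_congr_left hR]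
    rw [List.range_succ_eq_map, List.map_cons, List.map_map]
    simp [Function.comp]
  · -- too short: no yields on either side
    have hres : s.take k = s := List.take_of_length_le (by omega)
    have hif : ¬ ((s.take k).length : Int) = (k : Int) := by
      rw [hres]; intro h; exact hlen (by exact_mod_cast h.ge)
    rw [if_neg hif]
    have hdrop : s.drop k = [] := List.drop_eq_nil_of_le (by omega)
    rw [hdrop]
    have : (s.length : Int) - (k : Int) + 1 ≤ 0 := by
      have : s.length < k := by omega
      omega
    rw [PySem.List.pyRange_one_eq_nil (by omega)]
    simp

-- ===== VERDICT (by name: the statement is the Claim_ definition above) =====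
theorem FormatDataForLSTM_spec : Claim_equal_FormatDataForLSTM := by
  intro stocks w _ hpre
  unfold Spec_FormatDataForLSTM FormatDataForLSTM FormatDataForLSTM_alt
  simp only [PySem.List.foldl_append_singleton_eq_map, List.nil_append,
    PySem.List.foldl_append_eq_flatten, PySem.List.foldl_append_eq_flatMap]
  rw [List.map_congr_left (fun s _ => window1_eq s w hpre)]
  rw [← List.flatMap_def]
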